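-- pv_equiv track=rewrite | github.com/jaredkoontz/leetcode_py | 0000_no_leet/test_common_anagrams.py | countCommonAnagrams
-- ===== SOURCE A (Python) =====
-- class TrieNode:
--     def __init__(self):
--         self.children = [None] * 26
--         self.isEndOfWord = False
--
-- def insert(root, word):
--     curr = root
--     for c in word:
--         index = ord(c) - ord("a")
--         if curr.children[index] is None:
--             curr.children[index] = TrieNode()
--         curr = curr.children[index]
--     curr.isEndOfWord = True
--
-- def search(root, word):
--     node = root
--     for c in word:
--         index = ord(c) - ord("a")
--         if node.children[index] is None:
--             return False
--         node = node.children[index]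
--     return node.isEndOfWord
--
-- def countCommonAnagrams(s1, s2):
--     common_anagrams = []
--     root = TrieNode()
--     n = len(s1)
--
--     for i in range(n):
--         for j in range(i + 1, n + 1):
--             substr = s1[i:j]
--             sorted_substr = "".join(sorted(substr))
--             insert(root, sorted_substr)
--
--     m = len(s2)
--
--     for i in range(m):
--         for j in range(i + 1, m + 1):
--             substr = s2[i:j]
--             sorted_substr = "".join(sorted(substr))
--             if search(root, sorted_substr):
--                 common_anagrams.append(substr)
--
--     return common_anagrams
-- ===== SOURCE B (Python) =====
-- def countCommonAnagrams(s1, s2):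
--     # Incremental 26-letter count signatures: every substring's letter-count
--     # vector of s1 goes into a hash set (O(1) update per extension), then each
--     # substring of s2 is tested by its own incrementally-maintained vector.
--     sigs = set()
--     n = len(s1)
--     for i in range(n):
--         cnt = [0] * 26
--         for ch in s1[i:]:
--             cnt[ord(ch) - 97] += 1
--             sigs.add(tuple(cnt))
--     res = []
--     m = len(s2)
--     for i in range(m):
--         cnt = [0] * 26
--         cur = ""
--         for ch in s2[i:]:
--             cnt[ord(ch) - 97] += 1
--             cur += ch
--             if tuple(cnt) in sigs:
--                 res.append(cur)
--     return res
-- ===== Notes on version B (the rewrite author's own statement) =====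
-- stated objective: faster
-- what changed: Replaces A's per-substring sorting plus trie insert/search with incrementally maintained 26-letter count-vector signatures stored in a hash set (O(1) update and lookup per substring extension).
-- outside the precondition, e.g. on countCommonAnagrams('`a', 'az'): A returns ['a', 'z'], B returns ['a', 'az', 'z']
import Mathlib
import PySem

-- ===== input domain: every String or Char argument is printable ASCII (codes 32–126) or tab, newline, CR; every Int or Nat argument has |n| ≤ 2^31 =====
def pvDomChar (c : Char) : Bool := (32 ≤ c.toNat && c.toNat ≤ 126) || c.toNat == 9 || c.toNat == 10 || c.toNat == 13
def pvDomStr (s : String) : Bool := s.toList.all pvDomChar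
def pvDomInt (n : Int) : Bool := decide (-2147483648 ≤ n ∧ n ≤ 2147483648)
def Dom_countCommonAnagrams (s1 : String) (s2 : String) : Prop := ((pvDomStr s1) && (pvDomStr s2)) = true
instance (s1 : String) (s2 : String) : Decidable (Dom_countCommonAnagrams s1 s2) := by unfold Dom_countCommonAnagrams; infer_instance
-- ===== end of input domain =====

-- B replaces A's per-substring sort + trie insert/search by incrementally maintained
-- 26-letter count vectors stored in a hash set (objective: faster).

-- ===== PORT A =====
-- Python's TrieNode: 'nil' plays None; a fresh TrieNode() is 'node false' with all-nil children
-- (behaviourally identical to nil, created on demand exactly as Python does).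
inductive PvTrie where
  | nil : PvTrie
  | node : Bool → (Fin 26 → PvTrie) → PvTrie

def PvTrie.isEnd : PvTrie → Bool
  | .nil => false
  | .node e _ => e

def PvTrie.child : PvTrie → Fin 26 → PvTrie
  | .nil, _ => .nil
  | .node _ ch, i => ch i

-- index = ord(c) - ord('a'); exact for 'a'..'z' (all of Pre_); the else-branch only makes it total
def pvIdxA (c : Char) : Fin 26 :=
  if h : 97 ≤ c.toNat ∧ c.toNat ≤ 122 then ⟨c.toNat - 97, by omega⟩ else ⟨0, by omega⟩

def pvInsert : PvTrie → List Char → PvTrie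
  | t, [] => .node true t.child
  | t, c :: rest =>
      .node t.isEnd (Function.update t.child (pvIdxA c) (pvInsert (t.child (pvIdxA c)) rest))

def pvSearch : PvTrie → List Char → Bool
  | .nil, _ => false
  | .node e _, [] => e
  | .node _ ch, c :: rest => pvSearch (ch (pvIdxA c)) rest

def countCommonAnagrams (s1 : String) (s2 : String) : List String :=
  let l1 := s1.toList
  let n : Int := l1.length
  let root := (PySem.List.pyRange 0 n 1).foldl (fun r i =>
    (PySem.List.pyRange (i + 1) (n + 1) 1).foldl (fun r j =>
      pvInsert r (PySem.List.sorted (PySem.List.slice l1 (some i) (some j)) (fun c => c) false)) r)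
    PvTrie.nil
  let l2 := s2.toList
  let m : Int := l2.length
  (PySem.List.pyRange 0 m 1).foldl (fun acc i =>
    (PySem.List.pyRange (i + 1) (m + 1) 1).foldl (fun acc j =>
      let substr := PySem.List.slice l2 (some i) (some j)
      if pvSearch root (PySem.List.sorted substr (fun c => c) false) then
        acc ++ [String.ofList substr]
      else acc) acc) []

-- ===== PORT B =====
-- cnt[ord(ch) - 97] += 1; exact for 'a'..'z' (all of Pre_); the else-branch only makes it total
def pvIdxB (c : Char) : Nat :=
  if 97 ≤ c.toNat ∧ c.toNat ≤ 122 then c.toNat - 97 else 0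

def pvBump (cnt : List Int) (k : Nat) : List Int := cnt.set k (cnt.getD k 0 + 1)

def pvZeros : List Int := List.replicate 26 0

def pvAddSigs (p : List Int × PySem.Set (List Int)) (ch : Char) :
    List Int × PySem.Set (List Int) :=
  let cnt := pvBump p.1 (pvIdxB ch)
  (cnt, PySem.Set.add p.2 cnt)

def pvSigs (l1 : List Char) : PySem.Set (List Int) :=
  (List.range l1.length).foldl (fun s i => ((l1.drop i).foldl pvAddSigs (pvZeros, s)).2)
    PySem.Set.empty

def pvStepB (sigs : PySem.Set (List Int)) (st : List Int × List Char × List String) (ch : Char) :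
    List Int × List Char × List String :=
  let cnt := pvBump st.1 (pvIdxB ch)
  let cur := st.2.1 ++ [ch]
  (cnt, cur, if PySem.Set.contains sigs cnt then st.2.2 ++ [String.ofList cur] else st.2.2)

def countCommonAnagrams_alt (s1 : String) (s2 : String) : List String :=
  let sigs := pvSigs s1.toList
  let l2 := s2.toList
  (List.range l2.length).foldl (fun res i => ((l2.drop i).foldl (pvStepB sigs) (pvZeros, [], res)).2.2) []

-- ===== PRECONDITION & SPEC =====
-- Pre_ restricts to the function's natural domain: both strings made of lowercase 'a'..'z' only.
-- Outside it A either raises IndexError (characters below 'G' or above 'z') or returns values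
-- produced by Python's negative-list-index wraparound silently aliasing 'G'..'`' onto 'a'..'z',
-- an artefact B does not reproduce.
def Pre_countCommonAnagrams (s1 : String) (s2 : String) : Prop :=
  s1.toList.all (fun c => 97 ≤ c.toNat && c.toNat ≤ 122) = true ∧
  s2.toList.all (fun c => 97 ≤ c.toNat && c.toNat ≤ 122) = true

instance (s1 : String) (s2 : String) : Decidable (Pre_countCommonAnagrams s1 s2) := by
  unfold Pre_countCommonAnagrams; infer_instance

def pvWitness_countCommonAnagrams : String × String := ("ab", "bca")

def Spec_countCommonAnagrams (s1 : String) (s2 : String) (out : List String) : Prop :=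
  out = countCommonAnagrams_alt s1 s2

instance (s1 : String) (s2 : String) (out : List String) :
    Decidable (Spec_countCommonAnagrams s1 s2 out) := by
  unfold Spec_countCommonAnagrams; infer_instance

-- ===== CLAIM (what is proved, stated in full; the proofs are below) =====
def Claim_equal_countCommonAnagrams : Prop := ∀ (s1 : String) (s2 : String),
  Dom_countCommonAnagrams s1 s2 → Pre_countCommonAnagrams s1 s2 →
  Spec_countCommonAnagrams s1 s2 (countCommonAnagrams s1 s2)

-- ===== LEMMAS AND PROOFS =====

-- all characters lowercase
def pvLower (w : List Char) : Prop := ∀ c ∈ w, 97 ≤ c.toNat ∧ c.toNat ≤ 122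

-- count vector accumulated from cnt over w (what B's inner loops maintain)
def pvCvec (cnt : List Int) (w : List Char) : List Int :=
  w.foldl (fun c ch => pvBump c (pvIdxB ch)) cnt

-- the list of keys A inserts into its trie
def pvKeys (l1 : List Char) : List (List Char) :=
  (PySem.List.pyRange 0 (l1.length : Int) 1).flatMap (fun i =>
    (PySem.List.pyRange (i + 1) ((l1.length : Int) + 1) 1).map (fun j =>
      PySem.List.sorted (PySem.List.slice l1 (some i) (some j)) (fun c => c) false))

-- canonical inner-loop output over a suffix, with accumulated prefix pre
def pvCanon (P : List Char → Bool) (pre : List Char) : List Char → List String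
  | [] => []
  | ch :: rest =>
      (if P (pre ++ [ch]) then [String.ofList (pre ++ [ch])] else []) ++
        pvCanon P (pre ++ [ch]) rest

theorem pvIdx_inj {c d : Char} (hc : 97 ≤ c.toNat ∧ c.toNat ≤ 122)
    (hd : 97 ≤ d.toNat ∧ d.toNat ≤ 122) (h : pvIdxA c = pvIdxA d) : c = d := by
  unfold pvIdxA at h
  rw [dif_pos hc, dif_pos hd] at h
  have hv : c.toNat = d.toNat := by
    have := Fin.val_eq_of_eq h
    simp at this
    omega
  have : c.val = d.val := by
    apply UInt32.toNat_inj.mp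
    exact hv
  exact Char.ext this

theorem pvSearch_insert (v w : List Char) (t : PvTrie) (hv : pvLower v) (hw : pvLower w) :
    pvSearch (pvInsert t v) w = (decide (w = v) || pvSearch t w) := by
  induction w generalizing v t with
  | nil =>
    cases v with
    | nil => cases t <;> simp [pvInsert, pvSearch]
    | cons d u => cases t <;> simp [pvInsert, pvSearch, PvTrie.isEnd]
  | cons c r ih =>
    have hc := hw c (by simp)
    have hr : pvLower r := fun x hx => hw x (by simp [hx])
    cases v with
    | nil => cases t <;> simp [pvInsert, pvSearch, PvTrie.child]
    | cons d u =>
      have hd := hv d (by simp)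
      have hu : pvLower u := fun x hx => hv x (by simp [hx])
      by_cases hcd : c = d
      · subst hcd
        have step : pvSearch (pvInsert t (c :: u)) (c :: r)
            = pvSearch (pvInsert (t.child (pvIdxA c)) u) r := by
          cases t <;> simp [pvInsert, pvSearch, PvTrie.child]
        rw [step, ih u _ hu hr]
        cases t <;> simp [pvSearch, PvTrie.child]
      · have hne : pvIdxA c ≠ pvIdxA d := fun hh => hcd (pvIdx_inj hc hd hh)
        cases t <;>
          simp [pvInsert, pvSearch, PvTrie.child, Function.update_of_ne hne, hcd]

theorem pvSearch_foldl (ws : List (List Char)) (t : PvTrie) (w : List Char)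
    (hw : pvLower w) (hws : ∀ v ∈ ws, pvLower v) :
    pvSearch (ws.foldl pvInsert t) w = (decide (w ∈ ws) || pvSearch t w) := by
  induction ws generalizing t with
  | nil => simp
  | cons v ws ih =>
    simp only [List.foldl_cons]
    rw [ih _ (fun x hx => hws x (List.mem_cons_of_mem _ hx)),
      pvSearch_insert v w t (hws v (by simp)) hw]
    simp only [List.mem_cons]
    cases pvSearch t w <;> cases h1 : decide (w = v) <;> cases h2 : decide (w ∈ ws) <;>
      simp_all

theorem pvFoldl_foldl_flatMap {α β γ : Type} (g : α → List β) (f : γ → β → γ)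
    (xs : List α) (init : γ) :
    xs.foldl (fun acc i => (g i).foldl f acc) init = (xs.flatMap g).foldl f init := by
  induction xs generalizing init with
  | nil => rfl
  | cons a xs ih => simp [List.flatMap_cons, List.foldl_append, ih]

theorem pvMem_keys (l1 : List Char) (x : List Char) :
    x ∈ pvKeys l1 ↔ ∃ i k : Nat, i < l1.length ∧ k < l1.length - i ∧
      x = PySem.List.sorted ((l1.drop i).take (k + 1)) (fun c => c) false := by
  unfold pvKeys
  simp only [List.mem_flatMap, List.mem_map, PySem.List.mem_pyRange_one]
  constructor
  · rintro ⟨i, ⟨hi0, hin⟩, y, ⟨⟨hj1, hj2⟩, rfl⟩⟩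
    refine ⟨i.toNat, (y.toNat - i.toNat) - 1, by omega, by omega, ?_⟩
    rw [PySem.List.slice_toNat _ hi0 (by omega)]
    have : y.toNat - i.toNat - 1 + 1 = y.toNat - i.toNat := by omega
    rw [this]
  · rintro ⟨i, k, hi, hk, rfl⟩
    refine ⟨(i : Int), ⟨by omega, by omega⟩, (i : Int) + (k + 1 : Nat), ⟨by omega, by omega⟩, ?_⟩
    rw [PySem.List.slice_natCast_add]

theorem pvMem_addSigs (suf : List Char) (cnt : List Int) (s : PySem.Set (List Int))
    (x : List Int) :
    x ∈ (suf.foldl pvAddSigs (cnt, s)).2 ↔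
      x ∈ s ∨ ∃ k : Nat, k < suf.length ∧ x = pvCvec cnt (suf.take (k + 1)) := by
  induction suf generalizing cnt s with
  | nil => simp
  | cons ch rest ih =>
    simp only [List.foldl_cons, pvAddSigs]
    rw [ih]
    simp only [PySem.Set.mem_add]
    constructor
    · rintro ((hs | hx) | ⟨k, hk, rfl⟩)
      · exact Or.inl hs
      · exact Or.inr ⟨0, by simp, by simp [pvCvec, hx]⟩
      · exact Or.inr ⟨k + 1, by simp; omega, by simp [pvCvec]⟩
    · rintro (hs | ⟨k, hk, rfl⟩)
      · exact Or.inl (Or.inl hs)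
      · cases k with
        | zero => exact Or.inl (Or.inr (by simp [pvCvec]))
        | succ k =>
          exact Or.inr ⟨k, by simp at hk; omega, by simp [pvCvec]⟩

theorem pvMem_sigs (l1 : List Char) (x : List Int) :
    x ∈ pvSigs l1 ↔ ∃ i k : Nat, i < l1.length ∧ k < l1.length - i ∧
      x = pvCvec pvZeros ((l1.drop i).take (k + 1)) := by
  have aux : ∀ (is : List Nat) (s : PySem.Set (List Int)),
      x ∈ is.foldl (fun s i => ((l1.drop i).foldl pvAddSigs (pvZeros, s)).2) s ↔
        x ∈ s ∨ ∃ i ∈ is, ∃ k : Nat, k < (l1.drop i).length ∧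
          x = pvCvec pvZeros ((l1.drop i).take (k + 1)) := by
    intro is
    induction is with
    | nil => simp
    | cons i is ih =>
      intro s
      simp only [List.foldl_cons]
      rw [ih, pvMem_addSigs]
      simp only [List.exists_mem_cons_iff]
      exact or_assoc
  unfold pvSigs
  rw [aux]
  simp [List.mem_range, PySem.Set.empty]

theorem pvLength_cvec (w : List Char) (cnt : List Int) :
    (pvCvec cnt w).length = cnt.length := by
  induction w generalizing cnt with
  | nil => rfl
  | cons c w ih => rw [pvCvec, List.foldl_cons, ← pvCvec, ih]; simp [pvBump]

theorem pvIdxB_lt (c : Char) : pvIdxB c < 26 := by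
  unfold pvIdxB; split <;> omega

theorem pvGetD_bump (cnt : List Int) (k j : Nat) (hk : k < cnt.length) :
    (pvBump cnt k).getD j 0 = if j = k then cnt.getD j 0 + 1 else cnt.getD j 0 := by
  unfold pvBump
  rcases eq_or_ne j k with rfl | hne
  · simp [List.getD_eq_getElem?_getD, hk]
  · simp [List.getD_eq_getElem?_getD, List.getElem?_set_ne (Ne.symm hne), hne]

theorem pvGetD_cvec (w : List Char) (cnt : List Int) (hlen : cnt.length = 26) (j : Nat)
    (_hj : j < 26) :
    (pvCvec cnt w).getD j 0 = cnt.getD j 0 + (w.countP (fun c => pvIdxB c == j) : Int) := by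
  induction w generalizing cnt with
  | nil => simp [pvCvec]
  | cons c w ih =>
    have hlen' : (pvBump cnt (pvIdxB c)).length = 26 := by simp [pvBump, hlen]
    have : pvCvec cnt (c :: w) = pvCvec (pvBump cnt (pvIdxB c)) w := rfl
    rw [this, ih _ hlen', pvGetD_bump _ _ _ (by rw [hlen]; exact pvIdxB_lt c),
      List.countP_cons]
    simp only [beq_iff_eq]
    by_cases h : pvIdxB c = j <;> simp [h, eq_comm] <;> omega

theorem pvIdxB_inj {c d : Char} (hc : 97 ≤ c.toNat ∧ c.toNat ≤ 122)
    (hd : 97 ≤ d.toNat ∧ d.toNat ≤ 122) (h : pvIdxB c = pvIdxB d) : c = d := by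
  unfold pvIdxB at h
  rw [if_pos hc, if_pos hd] at h
  have hv : c.toNat = d.toNat := by omega
  exact Char.ext (UInt32.toNat_inj.mp hv)

theorem pvCvec_eq_iff (u w : List Char) (hu : pvLower u) (hw : pvLower w) :
    pvCvec pvZeros u = pvCvec pvZeros w ↔ u.Perm w := by
  have hz : pvZeros.length = 26 := by simp [pvZeros]
  have hcnt : ∀ (v : List Char), pvLower v → ∀ a : Char, 97 ≤ a.toNat → a.toNat ≤ 122 →
      (v.countP (fun c => pvIdxB c == pvIdxB a) : Int) = v.count a := by
    intro v hv a ha1 ha2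
    have : v.countP (fun c => pvIdxB c == pvIdxB a) = v.countP (· == a) := by
      apply List.countP_congr
      intro c hc
      have hcl := hv c hc
      simp only [beq_iff_eq]
      constructor
      · intro h
        have := pvIdxB_inj hcl ⟨ha1, ha2⟩ h
        exact this
      · intro h; rw [h]
    rw [this]
    simp [List.count]
  constructor
  · intro h
    rw [List.perm_iff_count]
    intro a
    by_cases ha : 97 ≤ a.toNat ∧ a.toNat ≤ 122
    · have h1 := pvGetD_cvec u pvZeros hz (pvIdxB a) (pvIdxB_lt a)
      have h2 := pvGetD_cvec w pvZeros hz (pvIdxB a) (pvIdxB_lt a)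
      rw [h] at h1
      rw [h1] at h2
      have : (u.countP (fun c => pvIdxB c == pvIdxB a) : Int) =
          (w.countP (fun c => pvIdxB c == pvIdxB a) : Int) := by omega
      rw [hcnt u hu a ha.1 ha.2, hcnt w hw a ha.1 ha.2] at this
      exact_mod_cast this
    · have h1 : a ∉ u := fun hmem => ha (hu a hmem)
      have h2 : a ∉ w := fun hmem => ha (hw a hmem)
      rw [List.count_eq_zero.mpr h1, List.count_eq_zero.mpr h2]
  · intro h
    apply List.ext_getElem
    · rw [pvLength_cvec, pvLength_cvec]
    · intro j hj1 hj2
      have hj : j < 26 := by rw [pvLength_cvec, hz] at hj1; exact hj1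
      have g1 := pvGetD_cvec u pvZeros hz j hj
      have g2 := pvGetD_cvec w pvZeros hz j hj
      have hcp : u.countP (fun c => pvIdxB c == j) = w.countP (fun c => pvIdxB c == j) :=
        h.countP_eq _
      have e1 : (pvCvec pvZeros u).getD j 0 = (pvCvec pvZeros w).getD j 0 := by
        rw [g1, g2, hcp]
      rw [List.getD_eq_getElem?_getD, List.getD_eq_getElem?_getD,
        List.getElem?_eq_getElem hj1, List.getElem?_eq_getElem hj2] at e1
      simpa using e1

-- lowercase is preserved by drop/take/sorted
theorem pvLower_sublist {u w : List Char} (h : u.Sublist w) (hw : pvLower w) : pvLower u := by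
  intro c hc
  exact hw c (h.mem hc)

theorem pvLower_sorted {w : List Char} (hw : pvLower w) :
    pvLower (PySem.List.sorted w (fun c => c) false) := by
  intro c hc
  exact hw c ((PySem.List.mem_sorted _ _ _ _).mp hc)

-- the central predicate equality: trie search of the sorted word = signature membership
theorem pvPred_eq (l1 : List Char) (u : List Char) (h1 : pvLower l1) (hu : pvLower u) :
    pvSearch (pvKeys l1 |>.foldl pvInsert PvTrie.nil)
        (PySem.List.sorted u (fun c => c) false) =
      PySem.Set.contains (pvSigs l1) (pvCvec pvZeros u) := by
  have hkeys : ∀ v ∈ pvKeys l1, pvLower v := by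
    intro v hv
    obtain ⟨i, k, _, _, rfl⟩ := (pvMem_keys l1 v).mp hv
    exact pvLower_sorted (pvLower_sublist ((List.take_sublist (k + 1) (l1.drop i)).trans
      (List.drop_sublist i l1)) h1)
  rw [pvSearch_foldl _ _ _ (pvLower_sorted hu) hkeys]
  simp only [pvSearch, Bool.or_false]
  rw [show PySem.Set.contains (pvSigs l1) (pvCvec pvZeros u)
      = decide (pvCvec pvZeros u ∈ pvSigs l1) from by simp [PySem.Set.contains]]
  rw [decide_eq_decide]
  rw [pvMem_keys, pvMem_sigs]
  have hsub : ∀ i k : Nat, pvLower ((l1.drop i).take (k + 1)) := fun i k =>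
    pvLower_sublist ((List.take_sublist (k + 1) (l1.drop i)).trans (List.drop_sublist i l1)) h1
  constructor
  · rintro ⟨i, k, hi, hk, he⟩
    refine ⟨i, k, hi, hk, ?_⟩
    rw [pvCvec_eq_iff _ _ hu (hsub i k)]
    exact (PySem.List.sorted_id_eq_sorted_id_iff_perm _ _).mp he
  · rintro ⟨i, k, hi, hk, he⟩
    refine ⟨i, k, hi, hk, ?_⟩
    rw [PySem.List.sorted_id_eq_sorted_id_iff_perm]
    rw [← pvCvec_eq_iff _ _ hu (hsub i k)]
    exact he

theorem pvB_inner (sigs : PySem.Set (List Int)) (suf pre : List Char) (res : List String) :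
    (suf.foldl (pvStepB sigs) (pvCvec pvZeros pre, pre, res)).2.2 =
      res ++ pvCanon (fun w => PySem.Set.contains sigs (pvCvec pvZeros w)) pre suf := by
  induction suf generalizing pre res with
  | nil => simp [pvCanon]
  | cons ch rest ih =>
    simp only [List.foldl_cons]
    have hstep : pvStepB sigs (pvCvec pvZeros pre, pre, res) ch
        = (pvCvec pvZeros (pre ++ [ch]), pre ++ [ch],
           if PySem.Set.contains sigs (pvCvec pvZeros (pre ++ [ch])) then
             res ++ [String.ofList (pre ++ [ch])]
           else res) := by
      simp [pvStepB, pvCvec, List.foldl_append]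
    rw [hstep, ih]
    simp only [pvCanon]
    split <;> simp

theorem pvCanon_eq_range (P : List Char → Bool) (t pre : List Char) :
    pvCanon P pre t =
      ((List.range t.length).filter (fun k => P (pre ++ t.take (k + 1)))).map
        (fun k => String.ofList (pre ++ t.take (k + 1))) := by
  induction t generalizing pre with
  | nil => simp [pvCanon]
  | cons ch rest ih =>
    simp only [pvCanon]
    rw [ih (pre ++ [ch]), List.length_cons, List.range_succ_eq_map, List.filter_cons]
    simp only [List.take_succ_cons, List.take_zero, List.filter_map]
    split <;> simp [Function.comp_def, Nat.succ_eq_add_one, List.append_assoc]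

theorem pvMain (l1 l2 : List Char) (h1 : pvLower l1) (h2 : pvLower l2) :
    countCommonAnagrams (String.ofList l1) (String.ofList l2) =
      countCommonAnagrams_alt (String.ofList l1) (String.ofList l2) := by
  simp only [countCommonAnagrams, countCommonAnagrams_alt, String.toList_ofList]
  have hroot : (PySem.List.pyRange 0 (l1.length : Int) 1).foldl (fun r i =>
      (PySem.List.pyRange (i + 1) ((l1.length : Int) + 1) 1).foldl (fun r j =>
        pvInsert r (PySem.List.sorted (PySem.List.slice l1 (some i) (some j)) (fun c => c) false)) r)
      PvTrie.nil = (pvKeys l1).foldl pvInsert PvTrie.nil := by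
    unfold pvKeys
    rw [← pvFoldl_foldl_flatMap]
    simp only [List.foldl_map]
  rw [hroot]
  rw [PySem.List.pyRange_one 0 (l2.length : Int)]
  rw [show ((l2.length : Int) - 0).toNat = l2.length by omega]
  rw [List.foldl_map]
  apply PySem.List.foldl_congr_mem'
  intro i hi acc
  simp only [List.mem_range] at hi
  simp only [zero_add]
  rw [PySem.List.foldl_append_if (fun j => pvSearch ((pvKeys l1).foldl pvInsert PvTrie.nil)
      (PySem.List.sorted (PySem.List.slice l2 (some ((i : Nat) : Int)) (some j)) (fun c => c) false))
    (fun j => String.ofList (PySem.List.slice l2 (some ((i : Nat) : Int)) (some j)))]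
  rw [show ((pvZeros, ([] : List Char), acc)) = (pvCvec pvZeros [], ([] : List Char), acc) from rfl]
  rw [pvB_inner, pvCanon_eq_range]
  simp only [List.nil_append]
  congr 1
  rw [PySem.List.pyRange_one (((i : Nat) : Int) + 1) ((l2.length : Int) + 1)]
  rw [show ((l2.length : Int) + 1 - ((i : Nat) + 1)).toNat = (l2.drop i).length by
    simp only [List.length_drop]; omega]
  rw [List.filter_map, List.map_map]
  have hsl : ∀ k : Nat, PySem.List.slice l2 (some ((i : Nat) : Int))
      (some (((i : Nat) : Int) + 1 + (k : Nat))) = (l2.drop i).take (k + 1) := by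
    intro k
    rw [show ((i : Nat) : Int) + 1 + ((k : Nat) : Int) = ((i : Nat) : Int) + ((k + 1 : Nat) : Int) by
      push_cast; ring]
    rw [PySem.List.slice_natCast_add]
  have hlow : ∀ k : Nat, pvLower ((l2.drop i).take (k + 1)) := fun k =>
    pvLower_sublist ((List.take_sublist (k + 1) (l2.drop i)).trans (List.drop_sublist i l2)) h2
  have hfil : ∀ k ∈ List.range (l2.drop i).length,
      ((fun j => pvSearch ((pvKeys l1).foldl pvInsert PvTrie.nil)
          (PySem.List.sorted (PySem.List.slice l2 (some ((i : Nat) : Int)) (some j)) (fun c => c) false))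
        ∘ (fun k : Nat => ((i : Nat) : Int) + 1 + (k : Nat))) k =
      (fun k => PySem.Set.contains (pvSigs l1) (pvCvec pvZeros ((l2.drop i).take (k + 1)))) k := by
    intro k _
    simp only [Function.comp_apply]
    rw [hsl k, pvPred_eq l1 _ h1 (hlow k)]
  rw [List.filter_congr hfil]
  apply List.map_congr_left
  intro k hk
  simp only [Function.comp_apply]
  rw [hsl k]


-- ===== VERDICT (by name: the statement is the Claim_ definition above) =====
theorem countCommonAnagrams_spec : Claim_equal_countCommonAnagrams := by
  intro s1 s2 _ hpre
  unfold Spec_countCommonAnagrams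
  have h1 : pvLower s1.toList := by
    intro c hc
    have := List.all_eq_true.mp hpre.1 c hc
    simpa using this
  have h2 : pvLower s2.toList := by
    intro c hc
    have := List.all_eq_true.mp hpre.2 c hc
    simpa using this
  have h := pvMain s1.toList s2.toList h1 h2
  simpa using h
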